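-- pv_equiv track=rewrite | github.com/Python-AI-Solutions/entra-validation-app | entra_test_cli.py | _determine_env_file
-- ===== SOURCE A (Python) =====
-- DEFAULT_ENV_FILE = ".env"
--
-- def _determine_env_file(argv: list[str]) -> str:
--     env_file = DEFAULT_ENV_FILE
--     for idx, arg in enumerate(argv):
--         if arg in ("--env-file", "-e"):
--             if idx + 1 < len(argv):
--                 env_file = argv[idx + 1]
--         elif arg.startswith("--env-file="):
--             env_file = arg.split("=", 1)[1]
--         elif arg.startswith("-e="):
--             env_file = arg.split("=", 1)[1]
--     return env_file
-- ===== SOURCE B (Python) =====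
-- DEFAULT_ENV_FILE = ".env"
--
-- def _determine_env_file(argv: list[str]) -> str:
--     for idx in range(len(argv) - 1, -1, -1):
--         arg = argv[idx]
--         if arg in ("--env-file", "-e"):
--             if idx + 1 < len(argv):
--                 return argv[idx + 1]
--         elif arg.startswith("--env-file=") or arg.startswith("-e="):
--             return arg.split("=", 1)[1]
--     return DEFAULT_ENV_FILE
-- ===== Notes on version B (the rewrite author's own statement) =====
-- stated objective: alternative
-- what changed: Replaces A's forward scan with an overwrite accumulator by a reverse index scan that early-returns at the first (i.e. last-in-argv) argument that actually yields a setting.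
import Mathlib
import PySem

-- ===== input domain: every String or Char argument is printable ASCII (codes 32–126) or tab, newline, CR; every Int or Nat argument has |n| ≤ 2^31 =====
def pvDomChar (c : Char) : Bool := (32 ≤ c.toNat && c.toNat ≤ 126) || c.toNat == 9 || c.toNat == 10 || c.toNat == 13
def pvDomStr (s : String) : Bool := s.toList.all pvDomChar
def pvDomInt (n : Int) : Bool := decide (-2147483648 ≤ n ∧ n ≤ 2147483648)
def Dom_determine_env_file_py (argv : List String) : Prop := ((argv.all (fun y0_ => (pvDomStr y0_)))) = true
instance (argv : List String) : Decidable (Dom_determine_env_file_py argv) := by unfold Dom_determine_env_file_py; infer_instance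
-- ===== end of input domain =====

-- B replaces A's forward overwrite-accumulator scan by a reverse index scan with early return
-- (first producing argument from the right wins = A's last-write-wins); same O(n) cost, alternative decomposition.

-- ===== PORT A =====
-- literal port of A: forward fold over enumerate(argv), overwriting env_file.
-- pyGetD defaults "" are never used: every index read is guarded in range / split has ≥ 2 parts.
def determine_env_file_py (argv : List String) : String :=
  (PySem.List.enumerate argv).foldl (fun env_file p =>
    let idx := p.1
    let arg := p.2
    if arg = "--env-file" ∨ arg = "-e" then
      if idx + 1 < (argv.length : Int) then PySem.List.pyGetD argv (idx + 1) "" else env_file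
    else if PySem.Str.startswith arg "--env-file=" then
      PySem.List.pyGetD ((PySem.Str.splitMax? arg "=" 1).getD []) 1 ""
    else if PySem.Str.startswith arg "-e=" then
      PySem.List.pyGetD ((PySem.Str.splitMax? arg "=" 1).getD []) 1 ""
    else env_file) ".env"

-- ===== PORT B =====
-- port of Source B's reverse loop: recursion over the countdown index list range(len-1, -1, -1),
-- returning at the first argument that yields a setting.
def pvDetGo (argv : List String) : List Int → String
  | [] => ".env"
  | idx :: rest =>
    let arg := PySem.List.pyGetD argv idx ""
    if arg = "--env-file" ∨ arg = "-e" then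
      if idx + 1 < (argv.length : Int) then PySem.List.pyGetD argv (idx + 1) ""
      else pvDetGo argv rest
    else if PySem.Str.startswith arg "--env-file=" ∨ PySem.Str.startswith arg "-e=" then
      PySem.List.pyGetD ((PySem.Str.splitMax? arg "=" 1).getD []) 1 ""
    else pvDetGo argv rest

def determine_env_file_py_alt (argv : List String) : String :=
  pvDetGo argv (PySem.List.pyRange ((argv.length : Int) - 1) (-1) (-1))

-- ===== PRECONDITION & SPEC =====
def Spec_determine_env_file_py (argv : List String) (out : String) : Prop := out = determine_env_file_py_alt argv
instance (argv : List String) (out : String) : Decidable (Spec_determine_env_file_py argv out) := by unfold Spec_determine_env_file_py; infer_instance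

-- ===== CLAIM (what is proved, stated in full; the proofs are below) =====
def Claim_equal_determine_env_file_py : Prop := ∀ (argv : List String), Dom_determine_env_file_py argv → Spec_determine_env_file_py argv (determine_env_file_py argv)

-- ===== LEMMAS AND PROOFS =====

-- the setting an argument at index idx with text arg produces, if any
def pvStep (argv : List String) (p : Int × String) : Option String :=
  if p.2 = "--env-file" ∨ p.2 = "-e" then
    if p.1 + 1 < (argv.length : Int) then some (PySem.List.pyGetD argv (p.1 + 1) "") else none
  else if PySem.Str.startswith p.2 "--env-file=" then
    some (PySem.List.pyGetD ((PySem.Str.splitMax? p.2 "=" 1).getD []) 1 "")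
  else if PySem.Str.startswith p.2 "-e=" then
    some (PySem.List.pyGetD ((PySem.Str.splitMax? p.2 "=" 1).getD []) 1 "")
  else none

lemma foldl_getD_rev {α β : Type} (g : α → Option β) :
    ∀ (L : List α) (d : β),
      L.foldl (fun acc x => (g x).getD acc) d = (L.reverse.findSome? g).getD d := by
  intro L
  induction L with
  | nil => intro d; simp
  | cons x t ih =>
    intro d
    rw [List.foldl_cons, ih, List.reverse_cons, List.findSome?_append,
      List.findSome?_cons, List.findSome?_nil]
    cases hx : g x <;> cases h : t.reverse.findSome? g <;> simp_all

lemma A_eq_findSome (argv : List String) :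
    determine_env_file_py argv =
      ((PySem.List.enumerate argv).reverse.findSome? (pvStep argv)).getD ".env" := by
  rw [← foldl_getD_rev (pvStep argv)]
  unfold determine_env_file_py
  have hbody : (fun (env_file : String) (p : Int × String) =>
      let idx := p.1
      let arg := p.2
      if arg = "--env-file" ∨ arg = "-e" then
        if idx + 1 < (argv.length : Int) then PySem.List.pyGetD argv (idx + 1) "" else env_file
      else if PySem.Str.startswith arg "--env-file=" then
        PySem.List.pyGetD ((PySem.Str.splitMax? arg "=" 1).getD []) 1 ""
      else if PySem.Str.startswith arg "-e=" then
        PySem.List.pyGetD ((PySem.Str.splitMax? arg "=" 1).getD []) 1 ""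
      else env_file) = (fun acc p => (pvStep argv p).getD acc) := by
    funext acc p
    unfold pvStep
    dsimp only
    split_ifs <;> rfl
  rw [hbody]

lemma B_go_eq_findSome (argv : List String) :
    ∀ (l : List Int),
      pvDetGo argv l =
        (l.findSome? (fun j => pvStep argv (j, PySem.List.pyGetD argv j ""))).getD ".env" := by
  intro l
  induction l with
  | nil => simp [pvDetGo]
  | cons idx rest ih =>
    rw [List.findSome?_cons]
    simp only [pvDetGo, pvStep]
    by_cases h1 : PySem.List.pyGetD argv idx "" = "--env-file" ∨ PySem.List.pyGetD argv idx "" = "-e"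
    · simp only [if_pos h1]
      by_cases h2 : idx + 1 < (argv.length : Int)
      · simp only [if_pos h2]; rfl
      · simp only [if_neg h2]; exact ih
    · simp only [if_neg h1]
      by_cases h3 : PySem.Str.startswith (PySem.List.pyGetD argv idx "") "--env-file=" = true
      · simp only [if_pos (Or.inl h3 : _ ∨ PySem.Str.startswith (PySem.List.pyGetD argv idx "") "-e=" = true), if_pos h3]; rfl
      · by_cases h4 : PySem.Str.startswith (PySem.List.pyGetD argv idx "") "-e=" = true
        · simp only [if_pos (Or.inr h4 : PySem.Str.startswith (PySem.List.pyGetD argv idx "") "--env-file=" = true ∨ _), if_neg h3, if_pos h4]; rfl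
        · have hor : ¬(PySem.Str.startswith (PySem.List.pyGetD argv idx "") "--env-file=" = true ∨ PySem.Str.startswith (PySem.List.pyGetD argv idx "") "-e=" = true) := by tauto
          simp only [if_neg hor, if_neg h3, if_neg h4]; exact ih

-- ===== VERDICT (by name: the statement is the Claim_ definition above) =====
theorem determine_env_file_py_spec : Claim_equal_determine_env_file_py := by
  intro argv _
  unfold Spec_determine_env_file_py determine_env_file_py_alt
  rw [A_eq_findSome, B_go_eq_findSome]
  rw [PySem.List.pyRange_neg_one_eq_reverse]
  norm_num
  rw [PySem.List.enumerate_eq_map_pyRange (d := ""), ← List.map_reverse, List.findSome?_map]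
  rfl
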